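-- pv_equiv track=rewrite | github.com/Fintama/review-agent-action | scripts/post-review.py | is_comment_addressed
-- ===== SOURCE A (Python) =====
-- COMMENT_PROXIMITY_THRESHOLD = 5
--
-- def is_comment_addressed(
--     file_path: str,
--     line: int,
--     changed_ranges: dict[str, set[int]],
-- ) -> bool:
--     """Check if a previous comment was addressed by changes in the new push.
--
--     A comment is considered addressed if lines within COMMENT_PROXIMITY_THRESHOLD
--     of the comment's line were modified in the same file.
--     """
--     if not line or line <= 0:
--         return False
--     changed_lines = changed_ranges.get(file_path, set())
--     if not changed_lines:
--         return False
--     for offset in range(COMMENT_PROXIMITY_THRESHOLD + 1):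
--         if (line + offset) in changed_lines or (line - offset) in changed_lines:
--             return True
--     return False
-- ===== SOURCE B (Python) =====
-- COMMENT_PROXIMITY_THRESHOLD = 5
--
-- def _min_distance(line, lines):
--     """Smallest absolute distance from line to any changed line, or None."""
--     best = None
--     for c in lines:
--         d = c - line if c >= line else line - c
--         if best is None or d < best:
--             best = d
--     return best
--
-- def is_comment_addressed(file_path, line, changed_ranges):
--     if not line or line <= 0:
--         return False
--     best = _min_distance(line, changed_ranges.get(file_path, set()))
--     return best is not None and best <= COMMENT_PROXIMITY_THRESHOLD
-- ===== Notes on version B (the rewrite author's own statement) =====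
-- stated objective: alternative
-- what changed: B computes the minimum absolute distance from the comment line to the changed lines with a running-best accumulator over the set and compares it to the threshold, instead of A's fixed two-directional offset loop doing membership tests.
import Mathlib
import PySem

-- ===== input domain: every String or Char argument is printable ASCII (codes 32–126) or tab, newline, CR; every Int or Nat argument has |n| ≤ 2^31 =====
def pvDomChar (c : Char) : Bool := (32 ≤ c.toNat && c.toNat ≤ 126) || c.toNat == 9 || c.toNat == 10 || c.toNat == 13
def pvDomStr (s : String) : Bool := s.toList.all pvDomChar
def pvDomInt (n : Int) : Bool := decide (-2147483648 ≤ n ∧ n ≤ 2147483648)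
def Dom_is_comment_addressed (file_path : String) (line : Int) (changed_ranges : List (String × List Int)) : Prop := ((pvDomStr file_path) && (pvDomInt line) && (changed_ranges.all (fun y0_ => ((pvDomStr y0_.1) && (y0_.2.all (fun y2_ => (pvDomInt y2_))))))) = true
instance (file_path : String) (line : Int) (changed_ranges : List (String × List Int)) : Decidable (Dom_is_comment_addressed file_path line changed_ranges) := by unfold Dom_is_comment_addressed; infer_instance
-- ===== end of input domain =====

-- B replaces A's fixed two-directional offset loop of membership tests by a running minimum-distance accumulator over the changed lines, compared once to the threshold (alternative decomposition; same behaviour).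

def COMMENT_PROXIMITY_THRESHOLD : Int := 5

-- ===== PORT A =====
-- literal port of A: guard, dict.get with default empty set, emptiness check,
-- then 'for offset in range(6): if line+offset in S or line-offset in S: return True' (early return = any)
def is_comment_addressed (file_path : String) (line : Int) (changed_ranges : List (String × List Int)) : Bool :=
  if line == 0 || line ≤ 0 then false
  else
    let changed_lines := PySem.Dict.getD (PySem.Dict.mk changed_ranges) file_path []
    if changed_lines.isEmpty then false
    else (PySem.List.pyRange 0 (COMMENT_PROXIMITY_THRESHOLD + 1) 1).any
          (fun offset => changed_lines.contains (line + offset) || changed_lines.contains (line - offset))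

-- ===== PORT B =====
-- literal port of B's helper _min_distance: running-best accumulator over the set
def minDistAux (line : Int) : List Int → Option Int → Option Int
  | [], best => best
  | c :: rest, best =>
      let d := if c ≥ line then c - line else line - c
      match best with
      | none => minDistAux line rest (some d)
      | some b => minDistAux line rest (if d < b then some d else some b)

-- literal port of B: guard, helper on dict.get, then 'best is not None and best <= 5'
def is_comment_addressed_alt (file_path : String) (line : Int) (changed_ranges : List (String × List Int)) : Bool :=
  if line == 0 || line ≤ 0 then false
  else
    match minDistAux line (PySem.Dict.getD (PySem.Dict.mk changed_ranges) file_path []) none with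
    | none => false
    | some best => best ≤ COMMENT_PROXIMITY_THRESHOLD

-- ===== PRECONDITION & SPEC =====
def Spec_is_comment_addressed (file_path : String) (line : Int) (changed_ranges : List (String × List Int)) (out : Bool) : Prop := out = is_comment_addressed_alt file_path line changed_ranges
instance (file_path : String) (line : Int) (changed_ranges : List (String × List Int)) (out : Bool) : Decidable (Spec_is_comment_addressed file_path line changed_ranges out) := by unfold Spec_is_comment_addressed; infer_instance

-- ===== CLAIM (what is proved, stated in full; the proofs are below) =====
def Claim_equal_is_comment_addressed : Prop := ∀ (file_path : String) (line : Int) (changed_ranges : List (String × List Int)), Dom_is_comment_addressed file_path line changed_ranges → Spec_is_comment_addressed file_path line changed_ranges (is_comment_addressed file_path line changed_ranges)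

-- ===== LEMMAS AND PROOFS =====

-- the threshold test on the running minimum equals an 'any within distance' scan, modulo the accumulator
theorem minDist_le_iff_any (l : Int) : ∀ (L : List Int) (acc : Option Int),
    ((match minDistAux l L acc with
      | none => false
      | some best => decide (best ≤ COMMENT_PROXIMITY_THRESHOLD))
     = (L.any (fun c => decide (|c - l| ≤ COMMENT_PROXIMITY_THRESHOLD))
        || match acc with
           | none => false
           | some b => decide (b ≤ COMMENT_PROXIMITY_THRESHOLD))) := by
  intro L
  induction L with
  | nil => intro acc; cases acc <;> simp [minDistAux]
  | cons c rest ih =>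
    intro acc
    have hq : |c - l| = if c ≥ l then c - l else l - c := by
      split_ifs with h
      · exact abs_of_nonneg (by omega)
      · rw [abs_of_neg (by omega : c - l < 0)]; ring
    cases acc with
    | none =>
      simp only [minDistAux, List.any_cons, ih, hq, Bool.or_false]
      exact Bool.or_comm _ _
    | some b =>
      simp only [minDistAux, List.any_cons, hq]
      split_ifs <;> rw [ih] <;>
        apply Bool.eq_iff_iff.mpr <;>
        by_cases hp : (rest.any fun x => decide (|x - l| ≤ COMMENT_PROXIMITY_THRESHOLD)) = true <;>
        simp only [Bool.or_eq_true, decide_eq_true_eq, hp] <;>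
        simp only [COMMENT_PROXIMITY_THRESHOLD] at * <;>
        simp <;> omega

-- the offset scan over [0..5] finds a hit iff some changed line is within distance 5
theorem offset_any_eq_proximity_any (L : List Int) (l : Int) :
    ((PySem.List.pyRange 0 (COMMENT_PROXIMITY_THRESHOLD + 1) 1).any
      (fun offset => L.contains (l + offset) || L.contains (l - offset)))
    = L.any (fun c => |c - l| ≤ COMMENT_PROXIMITY_THRESHOLD) := by
  simp only [COMMENT_PROXIMITY_THRESHOLD]
  apply Bool.eq_iff_iff.mpr
  simp only [List.any_eq_true, Bool.or_eq_true, List.contains_iff_mem,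
    PySem.List.mem_pyRange_one, decide_eq_true_eq, abs_le]
  constructor
  · rintro ⟨off, ⟨h0, h6⟩, hmem | hmem⟩
    · exact ⟨l + off, hmem, by omega⟩
    · exact ⟨l - off, hmem, by omega⟩
  · rintro ⟨c, hc, habs⟩
    rcases le_total l c with h | h
    · exact ⟨c - l, ⟨by omega, by omega⟩, Or.inl (by simpa using hc)⟩
    · exact ⟨l - c, ⟨by omega, by omega⟩, Or.inr (by simpa using hc)⟩

-- ===== VERDICT (by name: the statement is the Claim_ definition above) =====
theorem is_comment_addressed_spec : Claim_equal_is_comment_addressed := by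
  intro file_path line changed_ranges _
  unfold Spec_is_comment_addressed is_comment_addressed is_comment_addressed_alt
  split
  · rfl
  · set L := PySem.Dict.getD (PySem.Dict.mk changed_ranges) file_path [] with hL
    have hmin := minDist_le_iff_any line L none
    by_cases hE : L.isEmpty
    · rw [List.isEmpty_iff.mp hE] at hmin ⊢
      simp [minDistAux]
    · simp only [hE, if_neg, Bool.false_eq_true, not_false_iff]
      rw [offset_any_eq_proximity_any L line]
      rw [Bool.or_false] at hmin
      exact hmin.symm
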